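-- pv_equiv track=rewrite | github.com/spartan231/Programming-Assignment-3 | src/PA_3.py | FindMaxVal
-- ===== SOURCE A (Python) =====
-- def FindMaxVal(A, B, v):
--     m = len(A)
--     n = len(B)
--     OPT = [[0 for _ in range(n+1)] for _ in range(m+1)]
--     for i in range(m+1):
--         OPT[i][0] = 0
--     for j in range(n+1):
--         OPT[0][j] = 0
--
--     for i in range(1, m+1):
--         for j in range(1, n+1):
--             curr_A = A[i-1]
--             curr_B = B[j-1]
--             if curr_A == curr_B:
--                 take_match = OPT[i-1][j-1] + v[curr_A]
--                 OPT[i][j] = max(take_match, OPT[i-1][j], OPT[i][j-1])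
--             else:
--                 OPT[i][j] = max(OPT[i-1][j], OPT[i][j-1])
--     return OPT[m][n], OPT
-- ===== SOURCE B (Python) =====
-- def FindMaxVal(A, B, v):
--     m = len(A)
--     n = len(B)
--     memo = {}
--
--     def solve(i, j):
--         if i == 0 or j == 0:
--             return 0
--         if (i, j) in memo:
--             return memo[(i, j)]
--         best = max(solve(i - 1, j), solve(i, j - 1))
--         if A[i - 1] == B[j - 1]:
--             best = max(best, solve(i - 1, j - 1) + v[A[i - 1]])
--         memo[(i, j)] = best
--         return best
--
--     total = solve(m, n)
--     OPT = [[solve(i, j) for j in range(n + 1)] for i in range(m + 1)]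
--     return total, OPT
-- ===== Notes on version B (the rewrite author's own statement) =====
-- stated objective: alternative
-- what changed: B replaces A's bottom-up nested-loop table fill with top-down memoized recursion: solve(i,j) computes each cell on demand from its three neighbours and caches it in a dict, then the table is materialized from the cache.
import Mathlib
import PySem

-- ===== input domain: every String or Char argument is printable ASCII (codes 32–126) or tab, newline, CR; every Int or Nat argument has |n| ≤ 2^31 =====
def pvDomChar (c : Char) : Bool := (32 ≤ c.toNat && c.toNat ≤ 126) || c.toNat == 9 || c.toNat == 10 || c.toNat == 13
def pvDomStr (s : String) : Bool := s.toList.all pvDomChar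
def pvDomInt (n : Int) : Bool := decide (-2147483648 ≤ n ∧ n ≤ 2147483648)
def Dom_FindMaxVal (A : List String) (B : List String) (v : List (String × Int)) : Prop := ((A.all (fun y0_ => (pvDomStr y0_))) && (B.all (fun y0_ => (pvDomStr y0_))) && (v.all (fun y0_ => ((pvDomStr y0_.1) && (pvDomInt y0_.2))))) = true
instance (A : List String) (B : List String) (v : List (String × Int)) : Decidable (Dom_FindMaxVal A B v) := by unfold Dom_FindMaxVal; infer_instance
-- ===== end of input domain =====

-- B replaces A's bottom-up nested-loop table fill with top-down memoized recursion
-- (solve(i,j) with a dict cache, table materialized from the cache); objective: alternative, same cost.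

-- ===== PORT A =====
-- OPT[i][j] read / write (all indices used are in range by construction of the loops)
def pvGetCell (O : List (List Int)) (i j : Nat) : Int := (O.getD i []).getD j 0
def pvSetCell (O : List (List Int)) (i j : Nat) (x : Int) : List (List Int) :=
  O.set i ((O.getD i []).set j x)

def FindMaxVal (A : List String) (B : List String) (v : List (String × Int)) : Int × List (List Int) :=
  let m := A.length
  let n := B.length
  let OPT0 := List.replicate (m+1) (List.replicate (n+1) (0:Int))
  -- for i in range(m+1): OPT[i][0] = 0   (range bounds are nonnegative, so Nat ranges are exact)
  let OPT1 := (List.range (m+1)).foldl (fun O i => pvSetCell O i 0 0) OPT0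
  -- for j in range(n+1): OPT[0][j] = 0
  let OPT2 := (List.range (n+1)).foldl (fun O j => pvSetCell O 0 j 0) OPT1
  -- the main double loop; v[curr_A] (KeyError when missing is excluded by Pre_) = first match in v
  let OPT3 := (List.range' 1 m).foldl (fun O i =>
    (List.range' 1 n).foldl (fun O j =>
      let currA := A.getD (i-1) ""
      let currB := B.getD (j-1) ""
      if currA = currB then
        let take := pvGetCell O (i-1) (j-1) + ((v.lookup currA).getD 0)
        pvSetCell O i j (max (max take (pvGetCell O (i-1) j)) (pvGetCell O i (j-1)))
      else
        pvSetCell O i j (max (pvGetCell O (i-1) j) (pvGetCell O i (j-1)))) O) OPT2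
  (pvGetCell OPT3 m n, OPT3)

-- ===== PORT B =====
-- solve(i, j): 0 on the borders; otherwise look the cell up in the memo dict, or compute it
-- from solve(i-1,j), solve(i,j-1) (and solve(i-1,j-1)+v[A[i-1]] on a match) and cache it.
-- The memo dict is threaded through the recursion (Python mutates it in place).
def pvSolve (A : List String) (Bs : List String) (v : List (String × Int)) :
    Nat → Nat → PySem.Dict (Nat × Nat) Int → Int × PySem.Dict (Nat × Nat) Int
  | 0, _, memo => (0, memo)
  | _+1, 0, memo => (0, memo)
  | i+1, j+1, memo =>
    match memo.get? (i+1, j+1) with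
    | some x => (x, memo)
    | none =>
      let r1 := pvSolve A Bs v i (j+1) memo
      let r2 := pvSolve A Bs v (i+1) j r1.2
      let best := max r1.1 r2.1
      if A.getD i "" = Bs.getD j "" then
        let r3 := pvSolve A Bs v i j r2.2
        let best2 := max best (r3.1 + ((v.lookup (A.getD i "")).getD 0))
        (best2, r3.2.insert (i+1, j+1) best2)
      else
        (best, r2.2.insert (i+1, j+1) best)
termination_by i j _ => (i, j)

def FindMaxVal_alt (A : List String) (B : List String) (v : List (String × Int)) : Int × List (List Int) :=
  let m := A.length
  let n := B.length
  let tm := pvSolve A B v m n PySem.Dict.empty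
  -- OPT = [[solve(i, j) for j in range(n+1)] for i in range(m+1)] — every inner cell is cached by now
  let OPT := (List.range (m+1)).map (fun i => (List.range (n+1)).map (fun j => (pvSolve A B v i j tm.2).1))
  (tm.1, OPT)

-- ===== PRECONDITION & SPEC =====
-- Pre_ excludes exactly the inputs where Python raises KeyError: some string occurring in both A and B
-- is missing from v (both A and B look v[a] up precisely when a match a == b is found).
def Pre_FindMaxVal (A : List String) (B : List String) (v : List (String × Int)) : Prop :=
  ∀ s ∈ A, s ∈ B → (v.lookup s).isSome = true
instance (A : List String) (B : List String) (v : List (String × Int)) : Decidable (Pre_FindMaxVal A B v) := by unfold Pre_FindMaxVal; infer_instance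
def pvWitness_FindMaxVal : List String × List String × (List (String × Int)) := (["a", "b"], ["b", "a"], [("a", 2), ("b", 3)])

def Spec_FindMaxVal (A : List String) (B : List String) (v : List (String × Int)) (out : Int × List (List Int)) : Prop := out = FindMaxVal_alt A B v
instance (A : List String) (B : List String) (v : List (String × Int)) (out : Int × List (List Int)) : Decidable (Spec_FindMaxVal A B v out) := by unfold Spec_FindMaxVal; infer_instance

-- ===== CLAIM (what is proved, stated in full; the proofs are below) =====
def Claim_equal_FindMaxVal : Prop := ∀ (A : List String) (B : List String) (v : List (String × Int)), Dom_FindMaxVal A B v → Pre_FindMaxVal A B v → Spec_FindMaxVal A B v (FindMaxVal A B v)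

-- ===== LEMMAS AND PROOFS =====

-- the common mathematical table both programs compute: cell i j = OPT[i][j]
def pvCell (A : List String) (B : List String) (v : List (String × Int)) : Nat → Nat → Int
  | 0, _ => 0
  | _+1, 0 => 0
  | i+1, j+1 =>
    let up := pvCell A B v i (j+1)
    let left := pvCell A B v (i+1) j
    if A.getD i "" = B.getD j "" then
      max (max (pvCell A B v i j + ((v.lookup (A.getD i "")).getD 0)) up) left
    else max up left
termination_by i j => (i, j)

def pvRow (A : List String) (B : List String) (v : List (String × Int)) (i : Nat) : List Int :=
  (List.range (B.length+1)).map (pvCell A B v i)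

lemma pvCell_zero (A B : List String) (v : List (String × Int)) (j : Nat) : pvCell A B v 0 j = 0 := by
  cases j <;> simp [pvCell]

lemma pvCell_zero' (A B : List String) (v : List (String × Int)) (i : Nat) : pvCell A B v i 0 = 0 := by
  cases i <;> simp [pvCell]

-- ---- B side: the memo invariant and correctness of pvSolve ----
def pvInv (A : List String) (B : List String) (v : List (String × Int))
    (memo : PySem.Dict (Nat × Nat) Int) : Prop :=
  ∀ p ∈ memo.items, p.2 = pvCell A B v p.1.1 p.1.2

lemma pvInv_empty (A B : List String) (v : List (String × Int)) :
    pvInv A B v PySem.Dict.empty := by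
  intro p hp
  simp [PySem.Dict.empty] at hp

lemma pvMax3 (a b c : Int) : max (max a b) c = max (max c a) b := by
  rw [max_comm (max a b) c, max_assoc]

lemma pvSolve_spec (A B : List String) (v : List (String × Int)) :
    ∀ (i j : Nat) (memo : PySem.Dict (Nat × Nat) Int), pvInv A B v memo →
      (pvSolve A B v i j memo).1 = pvCell A B v i j ∧ pvInv A B v (pvSolve A B v i j memo).2 := by
  intro i j
  induction i, j using pvCell.induct (A := A) (B := B) (v := v) with
  | case1 j =>
    intro memo h
    exact ⟨by simp [pvSolve, pvCell], by simpa [pvSolve] using h⟩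
  | case2 i =>
    intro memo h
    exact ⟨by simp [pvSolve, pvCell_zero'], by simpa [pvSolve] using h⟩
  | case3 i j heq ih1 ih2 ih3 =>
    intro memo h
    rw [pvSolve]
    cases hg : memo.get? (i+1, j+1) with
    | some x =>
      refine ⟨?_, h⟩
      have hm := h _ (PySem.Dict.mem_items_of_get?_eq_some memo hg)
      simpa using hm
    | none =>
      obtain ⟨e1, inv1⟩ := ih1 memo h
      obtain ⟨e2, inv2⟩ := ih2 _ inv1
      rw [if_pos heq]
      obtain ⟨e3, inv3⟩ := ih3 _ inv2
      have hval : max (max (pvSolve A B v i (j+1) memo).1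
            (pvSolve A B v (i+1) j (pvSolve A B v i (j+1) memo).2).1)
            ((pvSolve A B v i j (pvSolve A B v (i+1) j (pvSolve A B v i (j+1) memo).2).2).1
              + ((v.lookup (A.getD i "")).getD 0))
          = pvCell A B v (i+1) (j+1) := by
        rw [e1, e2, e3, pvCell, if_pos heq]
        exact pvMax3 _ _ _
      refine ⟨hval, ?_⟩
      intro p hp
      rcases (PySem.Dict.mem_items_insert _ _ _ _).mp hp with hne | ⟨hp', _⟩
      · subst hne
        simpa using hval
      · exact inv3 _ hp'
  | case4 i j hne ih1 ih2 =>
    intro memo h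
    rw [pvSolve]
    cases hg : memo.get? (i+1, j+1) with
    | some x =>
      refine ⟨?_, h⟩
      have hm := h _ (PySem.Dict.mem_items_of_get?_eq_some memo hg)
      simpa using hm
    | none =>
      obtain ⟨e1, inv1⟩ := ih1 memo h
      obtain ⟨e2, inv2⟩ := ih2 _ inv1
      rw [if_neg hne]
      have hval : max (pvSolve A B v i (j+1) memo).1
            (pvSolve A B v (i+1) j (pvSolve A B v i (j+1) memo).2).1
          = pvCell A B v (i+1) (j+1) := by
        rw [e1, e2, pvCell, if_neg hne]
      refine ⟨hval, ?_⟩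
      intro p hp
      rcases (PySem.Dict.mem_items_insert _ _ _ _).mp hp with hx | ⟨hp', _⟩
      · subst hx
        simpa using hval
      · exact inv2 _ hp'

lemma pvAlt_eq (A B : List String) (v : List (String × Int)) :
    FindMaxVal_alt A B v = (pvCell A B v A.length B.length, (List.range (A.length+1)).map (pvRow A B v)) := by
  unfold FindMaxVal_alt
  dsimp only
  have h0 := pvSolve_spec A B v A.length B.length PySem.Dict.empty (pvInv_empty A B v)
  congr 1
  · exact h0.1
  · apply List.map_congr_left
    intro i _
    unfold pvRow
    apply List.map_congr_left
    intro j _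
    exact (pvSolve_spec A B v i j _ h0.2).1

-- ---- generic helpers ----
lemma pvFoldl_id {α β : Type} (l : List β) (f : α → β → α) (a : α) (h : ∀ x ∈ l, f a x = a) :
    l.foldl f a = a := by
  induction l with
  | nil => rfl
  | cons x xs ih => simp only [List.foldl_cons, h x (by simp)]; exact ih (fun y hy => h y (by simp [hy]))

lemma pvGetD_map_range {α : Type} (f : Nat → α) (L r : Nat) (d : α) :
    (((List.range L).map f).getD r d) = if r < L then f r else d := by
  rcases Nat.lt_or_ge r L with h | h
  · rw [List.getD_eq_getElem _ _ (by simpa using h)]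
    simp [h]
  · rw [List.getD_eq_default _ _ (by simpa using h)]
    simp [Nat.not_lt.mpr h]

lemma pvSet_map_range {α : Type} (f : Nat → α) (L i : Nat) (x : α) :
    ((List.range L).map f).set i x = (List.range L).map (fun r => if r = i then x else f r) := by
  apply List.ext_getElem
  · simp
  · intro n h1 h2
    simp only [List.getElem_set, List.getElem_map, List.getElem_range]
    split_ifs with h h' h'
    · rfl
    · exact absurd h.symm h'
    · exact absurd h'.symm h
    · rfl

lemma pvMap_range_const {alpha : Type} (L : Nat) (f : Nat → alpha) (x : alpha)
    (h : ∀ r, r < L → f r = x) : (List.range L).map f = List.replicate L x := by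
  rw [List.eq_replicate_iff]
  refine ⟨by simp, ?_⟩
  intro b hb
  rcases List.mem_map.mp hb with ⟨j, hj, rfl⟩
  exact h j (List.mem_range.mp hj)

lemma pvRepl_set {alpha : Type} (L i : Nat) (x : alpha) :
    (List.replicate L x).set i x = List.replicate L x := by
  apply List.ext_getElem
  · simp
  · intro n h1 h2
    rw [List.getElem_set]
    simp

-- ---- A side: the table state during A's loops ----
def pvMix (A : List String) (B : List String) (v : List (String × Int)) (i j : Nat) : List (List Int) :=
  (List.range (A.length+1)).map (fun r =>
    if r < i then pvRow A B v r
    else if r = i then (List.range (B.length+1)).map (fun k => if k ≤ j then pvCell A B v r k else 0)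
    else List.replicate (B.length+1) 0)

-- the all-zero starting table is the i = 0 state of the invariant
lemma pvO0 (A B : List String) (v : List (String × Int)) :
    List.replicate (A.length+1) (List.replicate (B.length+1) (0:Int)) = pvMix A B v 0 B.length := by
  symm
  unfold pvMix
  apply pvMap_range_const
  intro r hr
  split_ifs with h1 h2
  · exact absurd h1 (by omega)
  · subst h2
    apply pvMap_range_const
    intro k _
    split_ifs with h3
    · exact pvCell_zero A B v k
    · rfl
  · rfl

-- the two zero-initialisation loops of A change nothing
lemma pvZeroLoop1 (A B : List String) :
    (List.range (A.length+1)).foldl (fun O i => pvSetCell O i 0 0)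
      (List.replicate (A.length+1) (List.replicate (B.length+1) (0:Int)))
      = List.replicate (A.length+1) (List.replicate (B.length+1) (0:Int)) := by
  apply pvFoldl_id
  intro i hi
  unfold pvSetCell
  rw [List.getD_eq_getElem _ _ (by simpa using List.mem_range.mp hi)]
  simp only [List.getElem_replicate]
  rw [pvRepl_set]
  exact pvRepl_set _ _ _

lemma pvZeroLoop2 (A B : List String) :
    (List.range (B.length+1)).foldl (fun O j => pvSetCell O 0 j 0)
      (List.replicate (A.length+1) (List.replicate (B.length+1) (0:Int)))
      = List.replicate (A.length+1) (List.replicate (B.length+1) (0:Int)) := by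
  apply pvFoldl_id
  intro j _
  unfold pvSetCell
  rw [List.getD_eq_getElem _ _ (by simp)]
  simp only [List.getElem_replicate]
  rw [pvRepl_set]
  exact pvRepl_set _ _ _

lemma pvGetCell_mix (A B : List String) (v : List (String × Int)) (i j r k : Nat)
    (hr : r < A.length+1) (hk : k < B.length+1) :
    pvGetCell (pvMix A B v i j) r k
      = if r < i then pvCell A B v r k
        else if r = i then (if k ≤ j then pvCell A B v r k else 0) else 0 := by
  unfold pvGetCell pvMix
  rw [pvGetD_map_range, if_pos hr]
  by_cases h1 : r < i
  · rw [if_pos h1, if_pos h1]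
    unfold pvRow
    rw [pvGetD_map_range, if_pos hk]
  · by_cases h2 : r = i
    · rw [if_neg h1, if_pos h2, if_neg h1, if_pos h2, pvGetD_map_range, if_pos hk]
    · rw [if_neg h1, if_neg h2, if_neg h1, if_neg h2]
      rw [List.getD_eq_getElem _ _ (by simpa using hk)]
      simp

-- writing cell (i'+1, t+1) extends row i'+1 of the invariant by one column
lemma pvSetCell_mix (A B : List String) (v : List (String × Int)) (i' t : Nat)
    (hi : i' + 1 ≤ A.length) :
    pvSetCell (pvMix A B v (i'+1) t) (i'+1) (t+1) (pvCell A B v (i'+1) (t+1))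
      = pvMix A B v (i'+1) (t+1) := by
  unfold pvSetCell pvMix
  rw [pvGetD_map_range, if_pos (by omega), if_neg (by omega), if_pos rfl]
  rw [pvSet_map_range, pvSet_map_range]
  apply List.map_congr_left
  intro r hr
  by_cases h1 : r = i'+1
  · subst h1
    rw [if_pos rfl, if_neg (by omega), if_pos rfl]
    apply List.map_congr_left
    intro k _
    by_cases h2 : k = t+1
    · subst h2
      rw [if_pos rfl, if_pos (by omega)]
    · rw [if_neg h2]
      by_cases h3 : k ≤ t
      · rw [if_pos h3, if_pos (by omega)]
      · rw [if_neg h3, if_neg (by omega)]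
  · rw [if_neg h1]
    by_cases h2 : r < i'+1
    · rw [if_pos h2, if_pos h2]
    · rw [if_neg h2, if_neg h1, if_neg h2, if_neg h1]

-- starting a new row: the j = 0 state of row i+1 is the finished state of row i
lemma pvMix_step (A B : List String) (v : List (String × Int)) (i : Nat) :
    pvMix A B v (i+1) 0 = pvMix A B v i B.length := by
  unfold pvMix
  apply List.map_congr_left
  intro r hr
  by_cases h1 : r < i
  · rw [if_pos (by omega), if_pos h1]
  · by_cases h2 : r = i
    · subst h2
      rw [if_pos (by omega), if_neg h1, if_pos rfl]
      unfold pvRow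
      symm
      apply List.map_congr_left
      intro k hk
      rw [if_pos (by have := List.mem_range.mp hk; omega)]
    · by_cases h3 : r = i+1
      · subst h3
        rw [if_neg (by omega), if_pos rfl, if_neg (by omega), if_neg (by omega)]
        apply pvMap_range_const
        intro k _
        by_cases h4 : k ≤ 0
        · rw [if_pos h4]
          have hk0 : k = 0 := by omega
          subst hk0
          exact pvCell_zero' A B v (i+1)
        · rw [if_neg h4]
      · rw [if_neg (by omega), if_neg h3, if_neg (by omega), if_neg h2]

lemma pvInnerA (A B : List String) (v : List (String × Int)) (i' : Nat) (hi : i' + 1 ≤ A.length) :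
    ∀ t, t ≤ B.length →
    ((List.range' 1 t).foldl (fun O j =>
        if A.getD (i'+1-1) "" = B.getD (j-1) "" then
          pvSetCell O (i'+1) j
            (max (max (pvGetCell O (i'+1-1) (j-1) + ((v.lookup (A.getD (i'+1-1) "")).getD 0))
              (pvGetCell O (i'+1-1) j)) (pvGetCell O (i'+1) (j-1)))
        else
          pvSetCell O (i'+1) j (max (pvGetCell O (i'+1-1) j) (pvGetCell O (i'+1) (j-1))))
      (pvMix A B v (i'+1) 0))
      = pvMix A B v (i'+1) t := by
  intro t
  induction t with
  | zero => intro _; rfl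
  | succ t ih =>
    intro ht
    rw [List.range'_concat, List.foldl_append, ih (by omega)]
    simp only [List.foldl_cons, List.foldl_nil]
    rw [show 1 + 1 * t = t + 1 by omega]
    simp only [Nat.add_sub_cancel]
    have g1 : pvGetCell (pvMix A B v (i'+1) t) i' t = pvCell A B v i' t := by
      rw [pvGetCell_mix A B v (i'+1) t i' t (by omega) (by omega), if_pos (by omega)]
    have g2 : pvGetCell (pvMix A B v (i'+1) t) i' (t+1) = pvCell A B v i' (t+1) := by
      rw [pvGetCell_mix A B v (i'+1) t i' (t+1) (by omega) (by omega), if_pos (by omega)]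
    have g3 : pvGetCell (pvMix A B v (i'+1) t) (i'+1) t = pvCell A B v (i'+1) t := by
      rw [pvGetCell_mix A B v (i'+1) t (i'+1) t (by omega) (by omega), if_neg (by omega),
        if_pos rfl, if_pos (by omega)]
    rw [g1, g2, g3]
    split_ifs with h
    · have hval : pvCell A B v (i'+1) (t+1)
          = max (max (pvCell A B v i' t + ((v.lookup (A.getD i' "")).getD 0))
              (pvCell A B v i' (t+1))) (pvCell A B v (i'+1) t) := by
        rw [pvCell]
        rw [if_pos h]
      rw [← hval]
      exact pvSetCell_mix A B v i' t hi
    · have hval : pvCell A B v (i'+1) (t+1)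
          = max (pvCell A B v i' (t+1)) (pvCell A B v (i'+1) t) := by
        rw [pvCell]
        rw [if_neg h]
      rw [← hval]
      exact pvSetCell_mix A B v i' t hi

lemma pvOuterA (A B : List String) (v : List (String × Int)) :
    ∀ t, t ≤ A.length →
    ((List.range' 1 t).foldl (fun O i =>
        (List.range' 1 B.length).foldl (fun O j =>
          if A.getD (i-1) "" = B.getD (j-1) "" then
            pvSetCell O i j
              (max (max (pvGetCell O (i-1) (j-1) + ((v.lookup (A.getD (i-1) "")).getD 0))
                (pvGetCell O (i-1) j)) (pvGetCell O i (j-1)))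
          else
            pvSetCell O i j (max (pvGetCell O (i-1) j) (pvGetCell O i (j-1)))) O)
      (pvMix A B v 0 B.length))
      = pvMix A B v t B.length := by
  intro t
  induction t with
  | zero => intro _; rfl
  | succ t ih =>
    intro ht
    rw [List.range'_concat, List.foldl_append, ih (by omega)]
    simp only [List.foldl_cons, List.foldl_nil]
    rw [show 1 + 1 * t = t + 1 by omega]
    rw [← pvMix_step A B v t]
    exact pvInnerA A B v t (by omega) B.length (le_refl _)

lemma pvA_eq (A B : List String) (v : List (String × Int)) :
    FindMaxVal A B v = (pvCell A B v A.length B.length, (List.range (A.length+1)).map (pvRow A B v)) := by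
  unfold FindMaxVal
  dsimp only
  rw [pvZeroLoop1, pvZeroLoop2, pvO0 A B v]
  rw [pvOuterA A B v A.length (le_refl _)]
  congr 1
  · rw [pvGetCell_mix A B v A.length B.length A.length B.length (by omega) (by omega)]
    rw [if_neg (by omega), if_pos rfl, if_pos (le_refl _)]
  · unfold pvMix
    apply List.map_congr_left
    intro r hr
    have hr' := List.mem_range.mp hr
    by_cases h1 : r < A.length
    · rw [if_pos h1]
    · have h2 : r = A.length := by omega
      subst h2
      rw [if_neg h1, if_pos rfl]
      symm
      unfold pvRow
      apply List.map_congr_left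
      intro k hk
      rw [if_pos (by have := List.mem_range.mp hk; omega)]

-- ===== VERDICT (by name: the statement is the Claim_ definition above) =====
theorem FindMaxVal_spec : Claim_equal_FindMaxVal := by
  intro A B v _ _
  unfold Spec_FindMaxVal
  rw [pvA_eq, pvAlt_eq]
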